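-- pv_equiv track=rewrite | github.com/sathish0416/Deep-Researcher-Agent | utils/simple_ai_synthesizer.py | _is_good_answer
-- ===== SOURCE A (Python) =====
-- def _is_good_answer(text: str) -> bool:
--     """Check if the answer is good quality."""
--     if len(text) < 10:
--         return False
--
--     # Check for common bad patterns
--     bad_patterns = [
--         "rate", "epoch", "training", "model", "loss", "accuracy",
--         "0.01", "5000", "sigmoid", "neural", "network"
--     ]
--
--     text_lower = text.lower()
--     for pattern in bad_patterns:
--         if pattern in text_lower:
--             return False
--
--     return True
-- ===== SOURCE B (Python) =====
-- _BAD = ("rate", "epoch", "training", "model", "loss", "accuracy",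
--         "0.01", "5000", "sigmoid", "neural", "network")
--
-- def _is_good_answer(text: str) -> bool:
--     if len(text) < 10:
--         return False
--     low = text.lower()
--     for i in range(len(low)):
--         if low.startswith(_BAD, i):
--             return False
--     return True
-- ===== Notes on version B (the rewrite author's own statement) =====
-- stated objective: alternative
-- what changed: Instead of looping over the bad patterns and running a separate substring scan for each, B makes a single left-to-right pass over the lowered text, testing at each position whether any bad pattern starts there via str.startswith with a tuple and a start index.
import Mathlib
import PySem

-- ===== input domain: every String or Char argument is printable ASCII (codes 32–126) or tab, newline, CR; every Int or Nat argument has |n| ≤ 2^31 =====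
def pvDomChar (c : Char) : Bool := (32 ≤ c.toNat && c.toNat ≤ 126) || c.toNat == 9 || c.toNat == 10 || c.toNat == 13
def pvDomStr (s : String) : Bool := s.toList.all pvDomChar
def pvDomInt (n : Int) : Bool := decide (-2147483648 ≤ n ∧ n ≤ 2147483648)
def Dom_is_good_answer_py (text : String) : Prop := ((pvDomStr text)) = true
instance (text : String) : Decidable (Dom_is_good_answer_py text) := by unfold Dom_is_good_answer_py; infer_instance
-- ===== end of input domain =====

-- B replaces A's k separate 'pattern in text' scans by one left-to-right pass over the
-- lowered text, testing at each position whether any bad pattern starts there (alternative).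

-- ===== PORT A =====
def pvBadPatterns : List String :=
  ["rate", "epoch", "training", "model", "loss", "accuracy",
   "0.01", "5000", "sigmoid", "neural", "network"]

-- the 'for pattern in bad_patterns: if pattern in text_lower: return False' loop
def pvLoopA (pats : List String) (tl : String) : Bool :=
  match pats with
  | [] => true
  | p :: ps => if PySem.Str.isIn p tl then false else pvLoopA ps tl

def is_good_answer_py (text : String) : Bool :=
  if PySem.Str.len text < 10 then false
  else pvLoopA pvBadPatterns (PySem.Str.lower text)

-- ===== PORT B =====
def pvBadLists : List (List Char) := pvBadPatterns.map String.toList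

-- the 'for i in range(len(low)): if low.startswith(_BAD, i): return False' loop,
-- as one pass over the suffixes of the lowered text
def pvScanB (pats : List (List Char)) : List Char → Bool
  | [] => true
  | c :: rest =>
    if pats.any (fun p => p.isPrefixOf (c :: rest)) then false else pvScanB pats rest

def is_good_answer_py_alt (text : String) : Bool :=
  if PySem.Str.len text < 10 then false
  else pvScanB pvBadLists (PySem.Str.lower text).toList

-- ===== PRECONDITION & SPEC =====
def Spec_is_good_answer_py (text : String) (out : Bool) : Prop := out = is_good_answer_py_alt text
instance (text : String) (out : Bool) : Decidable (Spec_is_good_answer_py text out) := by unfold Spec_is_good_answer_py; infer_instance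

-- ===== CLAIM (what is proved, stated in full; the proofs are below) =====
def Claim_equal_is_good_answer_py : Prop := ∀ (text : String), Dom_is_good_answer_py text → Spec_is_good_answer_py text (is_good_answer_py text)

-- ===== LEMMAS AND PROOFS =====

-- A's pattern loop returns false iff some pattern occurs in the text ('in')
theorem pvLoopA_eq_false_iff (pats : List String) (tl : String) :
    pvLoopA pats tl = false ↔ ∃ p ∈ pats, PySem.Chars.isIn p.toList tl.toList = true := by
  induction pats with
  | nil => simp [pvLoopA]
  | cons p ps ih =>
    rw [pvLoopA]
    by_cases h : PySem.Str.isIn p tl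
    · rw [if_pos h]
      have h' : PySem.Chars.isIn p.toList tl.toList = true := by
        simpa [PySem.Str.isIn] using h
      exact ⟨fun _ => ⟨p, List.mem_cons_self .., h'⟩, fun _ => rfl⟩
    · have h' : PySem.Chars.isIn p.toList tl.toList ≠ true := by
        simpa [PySem.Str.isIn] using h
      rw [if_neg h, ih]
      constructor
      · rintro ⟨q, hq, hin⟩; exact ⟨q, List.mem_cons_of_mem _ hq, hin⟩
      · rintro ⟨q, hq, hin⟩
        rcases List.mem_cons.mp hq with rfl | hq'
        · exact absurd hin h'
        · exact ⟨q, hq', hin⟩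

-- B's positional scan returns false iff some (nonempty) pattern is a prefix of some suffix
theorem pvScanB_eq_false_iff (pats : List (List Char)) (hne : ∀ p ∈ pats, p ≠ [])
    (s : List Char) :
    pvScanB pats s = false ↔ ∃ p ∈ pats, ∃ j, p <+: s.drop j := by
  induction s with
  | nil =>
    rw [pvScanB]
    constructor
    · intro h; cases h
    · rintro ⟨p, hp, _, hpre⟩
      simp only [List.drop_nil] at hpre
      exact absurd (List.prefix_nil.mp hpre) (hne p hp)
  | cons c rest ih =>
    rw [pvScanB]
    by_cases h : pats.any (fun p => p.isPrefixOf (c :: rest))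
    · rw [if_pos h]
      obtain ⟨p, hp, hpre⟩ := List.any_eq_true.mp h
      exact ⟨fun _ => ⟨p, hp, 0, List.isPrefixOf_iff_prefix.mp hpre⟩, fun _ => rfl⟩
    · rw [if_neg h, ih]
      constructor
      · rintro ⟨p, hp, j, hpre⟩
        exact ⟨p, hp, j + 1, by simpa using hpre⟩
      · rintro ⟨p, hp, j, hpre⟩
        cases j with
        | zero =>
          refine absurd (List.any_eq_true.mpr ⟨p, hp, ?_⟩) h
          exact List.isPrefixOf_iff_prefix.mpr (by simpa using hpre)
        | succ j => exact ⟨p, hp, j, by simpa using hpre⟩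

theorem pvBadLists_ne_nil : ∀ p ∈ pvBadLists, p ≠ [] := by decide

-- the two loops agree on every text
theorem pvLoop_eq_scan (tl : String) :
    pvLoopA pvBadPatterns tl = pvScanB pvBadLists tl.toList := by
  have key : pvLoopA pvBadPatterns tl = false ↔ pvScanB pvBadLists tl.toList = false := by
    rw [pvLoopA_eq_false_iff, pvScanB_eq_false_iff pvBadLists pvBadLists_ne_nil]
    constructor
    · rintro ⟨p, hp, hin⟩
      refine ⟨p.toList, List.mem_map_of_mem hp, ?_⟩
      exact (PySem.Chars.exists_prefix_drop_iff_isIn _ _).mpr hin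
    · rintro ⟨q, hq, hj⟩
      obtain ⟨p, hp, rfl⟩ := List.mem_map.mp hq
      exact ⟨p, hp, (PySem.Chars.exists_prefix_drop_iff_isIn _ _).mp hj⟩
  cases hA : pvLoopA pvBadPatterns tl <;> cases hB : pvScanB pvBadLists tl.toList <;>
    simp_all

-- ===== VERDICT (by name: the statement is the Claim_ definition above) =====
theorem is_good_answer_py_spec : Claim_equal_is_good_answer_py := by
  intro text _
  unfold Spec_is_good_answer_py is_good_answer_py is_good_answer_py_alt
  by_cases h : PySem.Str.len text < 10
  · rw [if_pos h, if_pos h]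
  · rw [if_neg h, if_neg h, pvLoop_eq_scan]
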